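-- pv_equiv track=rewrite | github.com/mevskiddy/AutoTSA | src/auto_tsa/search.py | _seasonal_period_candidates
-- ===== SOURCE A (Python) =====
-- from typing import Any, Dict, List, Optional, Tuple
--
-- def _seasonal_period_from_freq(freq: str | None) -> int:
--     if not freq:
--         return 4  # sensible fallback for quarterly-like data
--     freq = freq.upper()
--     if freq.startswith("H"):
--         return 24
--     if freq.startswith("D"):
--         return 7
--     if freq.startswith("W"):
--         return 52
--     if freq.startswith("M"):
--         return 12
--     if freq.startswith("Q"):
--         return 4
--     return 1
--
-- def _seasonal_period_candidates(freq: str | None, override: Optional[int] = None) -> List[int]: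
--     if override is not None and override > 0:
--         return [int(override)]
--     base = _seasonal_period_from_freq(freq)
--     candidates = {1, base}
--     if not freq:
--         return sorted([c for c in candidates if c > 0])
--     freq = freq.upper()
--     if freq.startswith("H"):
--         candidates.update([6, 12, 24])
--     elif freq.startswith("D"):
--         candidates.update([7, 14, 30])
--     elif freq.startswith("W"):
--         candidates.update([13, 26, 52])
--     elif freq.startswith("M"):
--         candidates.update([6, 12, 24])
--     elif freq.startswith("Q"):
--         candidates.update([2, 4])
--     return sorted([c for c in candidates if c > 0])
-- ===== SOURCE B (Python) =====
-- _TABLE = {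
--     "H": [1, 6, 12, 24],
--     "D": [1, 7, 14, 30],
--     "W": [1, 13, 26, 52],
--     "M": [1, 6, 12, 24],
--     "Q": [1, 2, 4],
-- }
--
-- def _seasonal_period_candidates(freq, override=None):
--     if override is not None and override > 0:
--         return [override]
--     if not freq:
--         return [1, 4]
--     return list(_TABLE.get(freq[0].upper(), [1]))
-- ===== Notes on version B (the rewrite author's own statement) =====
-- stated objective: simpler
-- what changed: Replaces the helper call plus set-building, filtering and sorting over five startswith branches by a single precomputed first-letter table lookup returning the already-sorted candidate list.
import Mathlib
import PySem

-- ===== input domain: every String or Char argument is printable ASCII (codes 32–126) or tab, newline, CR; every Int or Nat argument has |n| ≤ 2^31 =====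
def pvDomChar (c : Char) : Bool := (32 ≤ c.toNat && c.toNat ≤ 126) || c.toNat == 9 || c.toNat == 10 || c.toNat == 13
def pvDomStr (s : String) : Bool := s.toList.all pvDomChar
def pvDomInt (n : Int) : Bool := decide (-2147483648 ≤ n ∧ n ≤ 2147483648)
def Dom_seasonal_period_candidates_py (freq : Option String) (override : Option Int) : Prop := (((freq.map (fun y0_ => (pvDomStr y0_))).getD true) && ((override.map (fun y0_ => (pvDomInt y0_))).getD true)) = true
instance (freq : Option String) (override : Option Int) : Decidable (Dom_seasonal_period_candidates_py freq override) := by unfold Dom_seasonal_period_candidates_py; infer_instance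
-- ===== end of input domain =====

-- B replaces A's helper call + set building + filter + sort over five startswith branches
-- by a single precomputed first-letter table lookup (objective: simpler).

-- ===== PORT A =====
def spfFromFreq : Option String → Int
  | none => 4
  | some s =>
    if s = "" then 4 else
    let u := PySem.Str.upper s
    if PySem.Str.startswith u "H" then 24
    else if PySem.Str.startswith u "D" then 7
    else if PySem.Str.startswith u "W" then 52
    else if PySem.Str.startswith u "M" then 12
    else if PySem.Str.startswith u "Q" then 4
    else 1

def spcBody (freq : Option String) : List Int :=
  let base := spfFromFreq freq
  let candidates : PySem.Set Int := PySem.Set.ofList [1, base]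
  match freq with
  | none => PySem.List.sorted (candidates.filter (fun c => decide (c > 0))) (fun x => x) false
  | some s =>
    if s = "" then PySem.List.sorted (candidates.filter (fun c => decide (c > 0))) (fun x => x) false
    else
      let u := PySem.Str.upper s
      let candidates :=
        if PySem.Str.startswith u "H" then PySem.Set.update candidates [6,12,24]
        else if PySem.Str.startswith u "D" then PySem.Set.update candidates [7,14,30]
        else if PySem.Str.startswith u "W" then PySem.Set.update candidates [13,26,52]
        else if PySem.Str.startswith u "M" then PySem.Set.update candidates [6,12,24]
        else if PySem.Str.startswith u "Q" then PySem.Set.update candidates [2,4]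
        else candidates
      PySem.List.sorted (candidates.filter (fun c => decide (c > 0))) (fun x => x) false

def seasonal_period_candidates_py (freq : Option String) (override : Option Int) : List Int :=
  match override with
  | some o => if o > 0 then [o] else spcBody freq
  | none => spcBody freq

-- ===== PORT B =====
-- Python's one-char string freq[0].upper() is modelled as a Char key (Python has no char type).
def spcTable : PySem.Dict Char (List Int) := PySem.Dict.ofList
  [('H', [1, 6, 12, 24]),
   ('D', [1, 7, 14, 30]),
   ('W', [1, 13, 26, 52]),
   ('M', [1, 6, 12, 24]),
   ('Q', [1, 2, 4])]

def spcAltBody : Option String → List Int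
  | none => [1, 4]
  | some s =>
    match s.toList with
    | [] => [1, 4]
    | c :: _ => (PySem.Dict.get? spcTable (PySem.Chars.upperChar c)).getD [1]

def seasonal_period_candidates_py_alt (freq : Option String) (override : Option Int) : List Int :=
  match override with
  | some o => if o > 0 then [o] else spcAltBody freq
  | none => spcAltBody freq

-- ===== PRECONDITION & SPEC =====
def Spec_seasonal_period_candidates_py (freq : Option String) (override : Option Int) (out : List Int) : Prop := out = seasonal_period_candidates_py_alt freq override
instance (freq : Option String) (override : Option Int) (out : List Int) : Decidable (Spec_seasonal_period_candidates_py freq override out) := by unfold Spec_seasonal_period_candidates_py; infer_instance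

-- ===== CLAIM =====
def Claim_equal_seasonal_period_candidates_py : Prop := ∀ (freq : Option String) (override : Option Int), Dom_seasonal_period_candidates_py freq override → Spec_seasonal_period_candidates_py freq override (seasonal_period_candidates_py freq override)

-- ===== LEMMAS AND PROOFS =====
theorem body_eq (freq : Option String) : spcBody freq = spcAltBody freq := by
  cases freq with
  | none => decide
  | some s =>
    cases h : s.toList with
    | nil =>
      have hs : s = "" := by simpa using congrArg String.ofList h
      subst hs; decide
    | cons c rest =>
      have hs : s ≠ "" := by
        intro e; rw [e] at h; simp at h
      simp only [spcBody, spcAltBody, spfFromFreq, if_neg hs, PySem.Str.startswith_eq,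
        PySem.Str.toList_upper, h, PySem.Chars.upper, List.map]
      by_cases h1 : PySem.Chars.upperChar c = 'H'
      · simp [h1, PySem.Chars.startswith, List.isPrefixOf]
        decide
      by_cases h2 : PySem.Chars.upperChar c = 'D'
      · simp [h2, PySem.Chars.startswith, List.isPrefixOf]
        decide
      by_cases h3 : PySem.Chars.upperChar c = 'W'
      · simp [h3, PySem.Chars.startswith, List.isPrefixOf]
        decide
      by_cases h4 : PySem.Chars.upperChar c = 'M'
      · simp [h4, PySem.Chars.startswith, List.isPrefixOf]
        decide
      by_cases h5 : PySem.Chars.upperChar c = 'Q'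
      · simp [h5, PySem.Chars.startswith,
          List.isPrefixOf]
        decide
      · have ht : spcTable = PySem.Dict.mk [('H', [1, 6, 12, 24]), ('D', [1, 7, 14, 30]),
            ('W', [1, 13, 26, 52]), ('M', [1, 6, 12, 24]), ('Q', [1, 2, 4])] := by decide
        have g : spcTable.get? (PySem.Chars.upperChar c) = none := by
          rw [ht]
          simp [PySem.Dict.get?, Ne.symm h1, Ne.symm h2, Ne.symm h3, Ne.symm h4, Ne.symm h5]
        simp [Ne.symm h1, Ne.symm h2, Ne.symm h3, Ne.symm h4, Ne.symm h5, g,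
          PySem.Chars.startswith, List.isPrefixOf]
        decide

-- ===== VERDICT =====
theorem seasonal_period_candidates_py_spec : Claim_equal_seasonal_period_candidates_py := by
  intro freq override _
  unfold Spec_seasonal_period_candidates_py seasonal_period_candidates_py seasonal_period_candidates_py_alt
  cases override with
  | none => exact body_eq freq
  | some o => by_cases h : o > 0 <;> simp [h, body_eq freq]
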